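-- pv_equiv track=rewrite | github.com/JoonDY/cs61 | homework/hw02_recursion.py | missing_digits
-- ===== SOURCE A (Python) =====
-- def missing_digits(n):
--     """Given a number a that is in sorted, increasing order,
--     return the number of missing digits in n. A missing digit is
--     a number between the first and last digit of a that is not in n."""
--
--     ###############
--     # My Solution #
--     ###############
--
--     # With helper function
--
--     # def helper(previous, current, count, n):
--     #     if n == 0:
--     #         return count
--     #     else:
--     #         if (previous-current) > 1:
--     #             count += (previous - current) -1
--     #             return helper(n%10, n//10%10, count, n//10)
--     #         else:
--     #             return helper(n%10, n//10%10, count, n//10)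
--     # return helper(0, 0, 0, n)
--
--     if n < 10:
--         return 0
--     else:
--         if ((n % 10) - (n//10%10)) > 1:
--             return ((n % 10) - (n//10%10) - 1) + missing_digits(n//10)
--         else:
--             return missing_digits(n//10)
-- ===== SOURCE B (Python) =====
-- def missing_digits(n):
--     total = 0
--     while n >= 10:
--         d0 = n % 10
--         d1 = n // 10 % 10
--         if d0 - d1 > 1:
--             total += d0 - d1 - 1
--         n //= 10
--     return total
-- ===== Notes on version B (the rewrite author's own statement) =====
-- stated objective: idiomatic
-- what changed: Replaces the non-tail recursion with a flat while-loop that walks the digits low-to-high maintaining a running total.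
import Mathlib
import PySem

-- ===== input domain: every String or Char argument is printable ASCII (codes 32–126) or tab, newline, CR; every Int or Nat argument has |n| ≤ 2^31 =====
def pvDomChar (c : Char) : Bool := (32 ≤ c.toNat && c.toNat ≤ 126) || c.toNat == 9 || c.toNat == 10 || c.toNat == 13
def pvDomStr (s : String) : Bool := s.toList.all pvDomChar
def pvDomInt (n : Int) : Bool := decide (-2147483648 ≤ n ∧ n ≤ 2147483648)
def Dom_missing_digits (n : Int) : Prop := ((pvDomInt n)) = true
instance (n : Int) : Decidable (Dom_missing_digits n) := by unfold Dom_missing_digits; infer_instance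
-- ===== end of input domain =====

-- B replaces the recursion by an iterative low-to-high digit loop with an accumulator (same cost, different decomposition).

theorem pv_floordiv_ten_lt (n : Int) (h : ¬ n < 10) :
    (PySem.Int.floordiv n 10).toNat < n.toNat := by
  rw [PySem.Int.floordiv_eq_ediv_of_pos (by norm_num)]
  omega

-- ===== PORT A =====
def missing_digits (n : Int) : Int :=
  if n < 10 then 0
  else
    if (PySem.Int.mod n 10 - PySem.Int.mod (PySem.Int.floordiv n 10) 10) > 1 then
      (PySem.Int.mod n 10 - PySem.Int.mod (PySem.Int.floordiv n 10) 10 - 1)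
        + missing_digits (PySem.Int.floordiv n 10)
    else
      missing_digits (PySem.Int.floordiv n 10)
termination_by n.toNat
decreasing_by all_goals exact pv_floordiv_ten_lt n (by assumption)

-- ===== PORT B =====
-- the while loop, as tail recursion on the loop state (total, n)
def missing_digits_alt_loop (total : Int) (n : Int) : Int :=
  if h : n ≥ 10 then
    let d0 := PySem.Int.mod n 10
    let d1 := PySem.Int.mod (PySem.Int.floordiv n 10) 10
    missing_digits_alt_loop (if d0 - d1 > 1 then total + (d0 - d1 - 1) else total)
      (PySem.Int.floordiv n 10)
  else total
termination_by n.toNat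
decreasing_by exact pv_floordiv_ten_lt n (by omega)

def missing_digits_alt (n : Int) : Int := missing_digits_alt_loop 0 n

-- ===== PRECONDITION & SPEC =====
def Spec_missing_digits (n : Int) (out : Int) : Prop := out = missing_digits_alt n
instance (n : Int) (out : Int) : Decidable (Spec_missing_digits n out) := by unfold Spec_missing_digits; infer_instance

-- ===== CLAIM (what is proved, stated in full; the proofs are below) =====
def Claim_equal_missing_digits : Prop := ∀ (n : Int), Dom_missing_digits n → Spec_missing_digits n (missing_digits n)

-- ===== LEMMAS AND PROOFS =====

theorem loop_eq_add (total n : Int) :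
    missing_digits_alt_loop total n = total + missing_digits n := by
  induction total, n using missing_digits_alt_loop.induct with
  | case1 total n h d0 d1 ih =>
    rw [missing_digits_alt_loop, missing_digits]
    simp only [h, dif_pos, if_neg (by omega : ¬ n < 10)]
    simp only [d0, d1, dite_eq_ite] at ih
    rw [ih]
    split_ifs <;> ring
  | case2 total n h =>
    rw [missing_digits_alt_loop, missing_digits]
    simp only [dif_neg h, if_pos (by omega : n < 10), add_zero]

-- ===== VERDICT (by name: the statement is the Claim_ definition above) =====
theorem missing_digits_spec : Claim_equal_missing_digits := by
  intro n _
  unfold Spec_missing_digits missing_digits_alt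
  rw [loop_eq_add 0 n, zero_add]
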